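-- pv_equiv track=rewrite | github.com/RelationalAI/annotated-tables | TabPFN/tabpfn/aproto.py | table_name_sanitize
-- ===== SOURCE A (Python) =====
-- def table_name_sanitize(orig_name):
--     split_chars = [" ", "_", "-"]
--     name = orig_name
--     for c in split_chars:
--         splitted = name.split(c)
--         upp = []
--         for s in splitted:
--             if len(s) != 0:
--                 upp.append(s[0].upper() + s[1:])
--         name = "".join(upp)
--     return name
-- ===== SOURCE B (Python) =====
-- def table_name_sanitize(orig_name):
--     out = []
--     start = True
--     for ch in orig_name:
--         if ch in " _-":
--             start = True
--         else:
--             out.append(ch.upper() if start else ch)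
--             start = False
--     return "".join(out)
-- ===== Notes on version B (the rewrite author's own statement) =====
-- stated objective: alternative
-- what changed: Replaces A's three sequential split/capitalize/rejoin passes (one per delimiter, each rebuilding the whole string) by a single left-to-right character scan with a start-of-word flag that drops delimiters and uppercases the first character of each segment; same O(n) work in one traversal, but the per-character Python loop is not faster than A's C-level split/join.
import Mathlib
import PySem

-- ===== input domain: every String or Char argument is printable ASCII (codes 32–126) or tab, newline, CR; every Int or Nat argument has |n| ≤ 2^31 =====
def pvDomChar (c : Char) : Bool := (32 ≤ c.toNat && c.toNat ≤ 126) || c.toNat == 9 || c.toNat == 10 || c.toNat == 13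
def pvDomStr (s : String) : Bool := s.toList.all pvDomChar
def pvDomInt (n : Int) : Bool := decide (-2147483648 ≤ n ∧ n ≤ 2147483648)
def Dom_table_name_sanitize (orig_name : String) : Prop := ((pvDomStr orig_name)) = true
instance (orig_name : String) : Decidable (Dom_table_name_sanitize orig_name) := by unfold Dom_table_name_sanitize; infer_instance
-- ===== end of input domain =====

-- B replaces A's three split/capitalize/rejoin passes by one character scan with a
-- start-of-word flag (objective: alternative — a single traversal instead of three passes).

-- ===== PORT A =====
-- literal transliteration of A: for c in [" ", "_", "-"]: split on c, keep nonempty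
-- pieces as s[0].upper() + s[1:], rejoin with "" (strings handled as their char lists;
-- s[0].upper() on a 1-char string is PySem.Chars.upperChar of that char — exact on ASCII).
def table_name_sanitize (orig_name : String) : String :=
  let split_chars : List (List Char) := [[' '], ['_'], ['-']]
  let name := split_chars.foldl
    (fun name c =>
      let splitted := PySem.Chars.splitOn name c
      let upp : List (List Char) := splitted.foldl
        (fun upp s =>
          if s.length ≠ 0 then
            upp ++ [[PySem.Chars.upperChar ((PySem.Chars.pyGet? s 0).getD ' ')] ++
                     PySem.Chars.slice s (some 1) none]
          else upp) []
      PySem.Chars.join [] upp)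
    orig_name.toList
  String.ofList name

-- ===== PORT B =====
-- B's scan: drop delimiters, uppercase the first character after a delimiter or the start.
def tnsScan (p : Char → Bool) : Bool → List Char → List Char
  | _, [] => []
  | start, ch :: t =>
    if p ch then tnsScan p true t
    else (if start then PySem.Chars.upperChar ch else ch) :: tnsScan p false t

def table_name_sanitize_alt (orig_name : String) : String :=
  String.ofList (tnsScan (fun ch => ch == ' ' || ch == '_' || ch == '-') true orig_name.toList)

-- ===== PRECONDITION & SPEC =====
def Spec_table_name_sanitize (orig_name : String) (out : String) : Prop := out = table_name_sanitize_alt orig_name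
instance (orig_name : String) (out : String) : Decidable (Spec_table_name_sanitize orig_name out) := by unfold Spec_table_name_sanitize; infer_instance

-- ===== CLAIM (what is proved, stated in full; the proofs are below) =====
def Claim_equal_table_name_sanitize : Prop := ∀ (orig_name : String), Dom_table_name_sanitize orig_name → Spec_table_name_sanitize orig_name (table_name_sanitize orig_name)

-- ===== LEMMAS AND PROOFS =====

-- facts about upperChar (Python's 1-char str.upper)
theorem islower_iff (c : Char) : PySem.Chars.islower c = true ↔ (97 ≤ c.toNat ∧ c.toNat ≤ 122) := by
  unfold PySem.Chars.islower
  rw [Bool.and_eq_true, decide_eq_true_iff, decide_eq_true_iff, Char.le_def, Char.le_def,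
    UInt32.le_iff_toNat_le, UInt32.le_iff_toNat_le]
  exact Iff.rfl

theorem toNat_upperChar_of_lower (c : Char) (h : PySem.Chars.islower c = true) :
    (PySem.Chars.upperChar c).toNat = c.toNat - 32 := by
  unfold PySem.Chars.upperChar
  rw [if_pos h, Char.toNat_ofNat, if_pos]
  have := (islower_iff c).1 h
  exact Or.inl (by omega)

theorem upperChar_of_not_lower (c : Char) (h : PySem.Chars.islower c = false) :
    PySem.Chars.upperChar c = c := by
  unfold PySem.Chars.upperChar
  rw [if_neg (by simp [h])]

theorem upperChar_idem (c : Char) :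
    PySem.Chars.upperChar (PySem.Chars.upperChar c) = PySem.Chars.upperChar c := by
  by_cases h : PySem.Chars.islower c = true
  · apply upperChar_of_not_lower
    rw [Bool.eq_false_iff]
    intro hl
    have h1 := (islower_iff _).1 h
    have h2 := (islower_iff _).1 hl
    rw [toNat_upperChar_of_lower c h] at h2
    omega
  · rw [upperChar_of_not_lower c (Bool.eq_false_iff.2 h),
        upperChar_of_not_lower c (Bool.eq_false_iff.2 h)]

theorem beq_char_iff_toNat (a b : Char) : (a == b) = decide (a.toNat = b.toNat) := by
  by_cases h : a = b
  · subst h; simp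
  · have hn : a.toNat ≠ b.toNat := fun hn => h (Char.ext (UInt32.toNat_inj.mp hn))
    simp [h, hn]

theorem upperChar_beq_nonletter (c d : Char)
    (hd : d.toNat < 65 ∨ (90 < d.toNat ∧ d.toNat < 97) ∨ 122 < d.toNat) :
    (PySem.Chars.upperChar c == d) = (c == d) := by
  by_cases h : PySem.Chars.islower c = true
  · have h1 := (islower_iff _).1 h
    have h2 := toNat_upperChar_of_lower c h
    rw [beq_char_iff_toNat, beq_char_iff_toNat]
    simp only [decide_eq_decide]
    constructor <;> intro hx <;> omega
  · rw [upperChar_of_not_lower c (Bool.eq_false_iff.2 h)]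

theorem upperChar_beq_underscore (c : Char) :
    (PySem.Chars.upperChar c == '_') = (c == '_') :=
  upperChar_beq_nonletter c '_' (by right; left; constructor <;> decide)

theorem upperChar_beq_dash (c : Char) :
    (PySem.Chars.upperChar c == '-') = (c == '-') :=
  upperChar_beq_nonletter c '-' (by left; decide)

-- structural version of Python's str.split with a single-character separator
def mySplit (c : Char) : List Char → List (List Char)
  | [] => [[]]
  | x :: t => if x == c then [] :: mySplit c t else (mySplit c t).modifyHead (x :: ·)

-- capitalize each nonempty segment and concatenate (A's inner loop + "".join)
def joinCap : List (List Char) → List Char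
  | [] => []
  | [] :: rest => joinCap rest
  | (a :: t) :: rest => (PySem.Chars.upperChar a :: t) ++ joinCap rest

theorem mySplit_ne_nil (c : Char) (l : List Char) : mySplit c l ≠ [] := by
  induction l with
  | nil => simp [mySplit]
  | cons x t ih =>
    simp only [mySplit]
    split
    · simp
    · cases h : mySplit c t with
      | nil => exact absurd h ih
      | cons a r => simp [List.modifyHead]

theorem splitOn_go_eq (c : Char) :
    ∀ fuel (l cur : List Char) (acc : List (List Char)), l.length ≤ fuel →
      PySem.Chars.splitOn.go [c] fuel l cur acc =
        acc.reverse ++ (mySplit c l).modifyHead (cur.reverse ++ ·) := by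
  intro fuel
  induction fuel with
  | zero =>
    intro l cur acc h
    have : l = [] := List.eq_nil_of_length_eq_zero (Nat.le_zero.1 h)
    subst this
    simp [PySem.Chars.splitOn.go, mySplit, List.modifyHead]
  | succ fuel ih =>
    intro l cur acc h
    cases l with
    | nil => simp [PySem.Chars.splitOn.go, mySplit, List.modifyHead]
    | cons x t =>
      simp only [PySem.Chars.splitOn.go]
      by_cases hx : x = c
      · subst hx
        rw [if_pos (by simp [List.isPrefixOf])]
        simp only [List.length_cons, List.length_nil, Nat.zero_add, List.drop_succ_cons,
          List.drop_zero]
        rw [ih t [] (cur.reverse :: acc) (by simpa using h)]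
        simp [mySplit, List.modifyHead]
        cases mySplit x t <;> rfl
      · rw [if_neg (by simp [List.isPrefixOf]; exact fun h' => hx h'.symm)]
        rw [ih t (x :: cur) acc (by simpa using h)]
        simp only [mySplit, beq_iff_eq, if_neg hx]
        obtain ⟨a, r, hr⟩ : ∃ a r, mySplit c t = a :: r := by
          cases hmr : mySplit c t with
          | nil => exact absurd hmr (mySplit_ne_nil c t)
          | cons a r => exact ⟨a, r, rfl⟩
        rw [hr]
        simp [List.modifyHead]

theorem splitOn_eq_mySplit (c : Char) (l : List Char) :
    PySem.Chars.splitOn l [c] = mySplit c l := by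
  unfold PySem.Chars.splitOn
  rw [splitOn_go_eq c (l.length + 1) l [] [] (by omega)]
  obtain ⟨a, r, hr⟩ : ∃ a r, mySplit c l = a :: r := by
    cases hmr : mySplit c l with
    | nil => exact absurd hmr (mySplit_ne_nil c l)
    | cons a r => exact ⟨a, r, rfl⟩
  rw [hr]; simp [List.modifyHead]

theorem join_nil_eq_flatten (l : List (List Char)) : PySem.Chars.join [] l = l.flatten := by
  unfold PySem.Chars.join List.intercalate
  induction l with
  | nil => rfl
  | cons x t ih =>
    cases t with
    | nil => simp
    | cons y r =>
      simp only [List.intersperse, List.flatten_cons] at *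
      simp [ih]

-- A's inner loop + "".join over any segment list is joinCap
theorem foldl_upp_eq_joinCap (segs : List (List Char)) :
    ∀ acc : List (List Char),
      PySem.Chars.join []
        (segs.foldl
          (fun upp s =>
            if s.length ≠ 0 then
              upp ++ [[PySem.Chars.upperChar ((PySem.Chars.pyGet? s 0).getD ' ')] ++
                       PySem.Chars.slice s (some 1) none]
            else upp) acc) = PySem.Chars.join [] acc ++ joinCap segs := by
  induction segs with
  | nil => intro acc; simp [joinCap]
  | cons s rest ih =>
    intro acc
    cases s with
    | nil =>
      simp only [List.foldl_cons, List.length_nil, ne_eq, not_true_eq_false, if_neg,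
        not_false_eq_true]
      rw [ih]; rfl
    | cons a t =>
      simp only [List.foldl_cons, List.length_cons, ne_eq, Nat.succ_ne_zero, not_false_eq_true,
        if_pos]
      rw [ih]
      have h1 : PySem.Chars.pyGet? (a :: t) 0 = some a := by
        simp [PySem.Chars.pyGet?_eq_listPyGet?]
      have h2 : PySem.Chars.slice (a :: t) (some 1) none = t := by
        simp [PySem.Chars.slice_eq_listSlice, PySem.List.slice_from_one]
      rw [h1, h2]
      simp only [join_nil_eq_flatten, List.flatten_append, joinCap]
      simp

-- splitting on c then capitalizing/joining is one scan with delimiter c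
theorem joinCap_mySplit (c : Char) : ∀ l : List Char,
    (joinCap (mySplit c l) = tnsScan (· == c) true l) ∧
    (∀ s rest, mySplit c l = s :: rest → s ++ joinCap rest = tnsScan (· == c) false l) := by
  intro l
  induction l with
  | nil =>
    constructor
    · rfl
    · intro s rest h
      simp only [mySplit] at h
      cases h
      rfl
  | cons x t ih =>
    by_cases hx : x = c
    · subst hx
      have hsplit : mySplit x (x :: t) = [] :: mySplit x t := by simp [mySplit]
      constructor
      · rw [hsplit]
        show joinCap (mySplit x t) = tnsScan (· == x) true (x :: t)
        simp only [tnsScan, beq_self_eq_true, if_pos]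
        exact ih.1
      · intro s rest h
        rw [hsplit] at h
        cases h
        show joinCap (mySplit x t) = tnsScan (· == x) false (x :: t)
        simp only [tnsScan, beq_self_eq_true, if_pos]
        exact ih.1
    · obtain ⟨a, r, hr⟩ : ∃ a r, mySplit c t = a :: r := by
        cases hmr : mySplit c t with
        | nil => exact absurd hmr (mySplit_ne_nil c t)
        | cons a r => exact ⟨a, r, rfl⟩
      have hsplit : mySplit c (x :: t) = (x :: a) :: r := by
        simp only [mySplit, beq_iff_eq, if_neg hx, hr, List.modifyHead]
      have hb : (x == c) = false := beq_eq_false_iff_ne.2 hx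
      have htail := ih.2 a r hr
      constructor
      · rw [hsplit]
        show (PySem.Chars.upperChar x :: a) ++ joinCap r = tnsScan (· == c) true (x :: t)
        simp only [tnsScan, hb, Bool.false_eq_true, if_false]
        simp [htail]
      · intro s rest h
        rw [hsplit] at h
        cases h
        show (x :: a) ++ joinCap r = tnsScan (· == c) false (x :: t)
        simp only [tnsScan, hb, Bool.false_eq_true, if_false]
        simp [htail]

-- one pass of A equals one scan
theorem pass_eq_scan (c : Char) (l : List Char) :
    PySem.Chars.join []
      ((PySem.Chars.splitOn l [c]).foldl
        (fun upp s =>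
          if s.length ≠ 0 then
            upp ++ [[PySem.Chars.upperChar ((PySem.Chars.pyGet? s 0).getD ' ')] ++
                     PySem.Chars.slice s (some 1) none]
          else upp) []) = tnsScan (· == c) true l := by
  rw [splitOn_eq_mySplit, foldl_upp_eq_joinCap]
  simpa using (joinCap_mySplit c l).1

-- two consecutive scans fuse into one scan on the union of the delimiter sets
theorem scan_comp (p q : Char → Bool)
    (hq : ∀ ch, p ch = false → q (PySem.Chars.upperChar ch) = q ch) :
    ∀ (l : List Char) (b1 b2 : Bool),
      tnsScan q b2 (tnsScan p b1 l) = tnsScan (fun ch => p ch || q ch) (b1 || b2) l := by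
  intro l
  induction l with
  | nil => intro b1 b2; rfl
  | cons ch t ih =>
    intro b1 b2
    by_cases hp : p ch = true
    · simp only [tnsScan, hp, if_pos, Bool.true_or]
      rw [ih true b2]; simp
    · have hp' : p ch = false := Bool.eq_false_iff.2 hp
      by_cases hqc : q ch = true
      · have he : q (if b1 then PySem.Chars.upperChar ch else ch) = true := by
          cases b1 <;> simp [hqc, hq ch hp']
        simp only [tnsScan, hp', hqc, Bool.false_or, if_true, Bool.false_eq_true, if_false, he]
        rw [ih false true]
        simp
      · have hq' : q ch = false := Bool.eq_false_iff.2 hqc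
        have he : q (if b1 then PySem.Chars.upperChar ch else ch) = false := by
          cases b1 <;> simp [hq', hq ch hp']
        simp only [tnsScan, hp', hq', Bool.false_or, Bool.false_eq_true, if_false, he]
        rw [ih false false]
        cases b1 <;> cases b2 <;> simp [upperChar_idem]

-- ===== VERDICT (by name: the statement is the Claim_ definition above) =====
theorem table_name_sanitize_spec : Claim_equal_table_name_sanitize := by
  intro orig_name _
  unfold Spec_table_name_sanitize table_name_sanitize table_name_sanitize_alt
  simp only [List.foldl_cons, List.foldl_nil]
  rw [pass_eq_scan, pass_eq_scan, pass_eq_scan]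
  rw [scan_comp (· == ' ') (· == '_') (fun ch _ => upperChar_beq_underscore ch)]
  rw [scan_comp (fun ch => ch == ' ' || ch == '_') (· == '-')
    (fun ch _ => upperChar_beq_dash ch)]
  simp
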